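-- pv_equiv track=rewrite | github.com/felipemillan/python-bulk-email-verifier | verifier_app/filters.py | filter_domains
-- ===== SOURCE A (Python) =====
-- def filter_domains(address_list, domain_list):
--     result = []
--
--     for address in address_list:
--         if any(domain in address for domain in domain_list):
--             continue
--         else:
--             result.append(address)
--
--     return result
-- ===== SOURCE B (Python) =====
-- def filter_domains(address_list, domain_list):
--     # Sieve: each blocked domain removes its matches from the surviving list.
--     survivors = list(address_list)
--     for domain in domain_list:
--         survivors = [a for a in survivors if domain not in a]
--     return survivors
-- ===== Notes on version B (the rewrite author's own statement) =====
-- stated objective: alternative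
-- what changed: B swaps the loop nesting: instead of scanning all domains for each address and appending survivors to an accumulator, it makes one filtering pass over the surviving address list per domain (a successive sieve), exploiting that order-preserving filters commute with conjunction.
import Mathlib
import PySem

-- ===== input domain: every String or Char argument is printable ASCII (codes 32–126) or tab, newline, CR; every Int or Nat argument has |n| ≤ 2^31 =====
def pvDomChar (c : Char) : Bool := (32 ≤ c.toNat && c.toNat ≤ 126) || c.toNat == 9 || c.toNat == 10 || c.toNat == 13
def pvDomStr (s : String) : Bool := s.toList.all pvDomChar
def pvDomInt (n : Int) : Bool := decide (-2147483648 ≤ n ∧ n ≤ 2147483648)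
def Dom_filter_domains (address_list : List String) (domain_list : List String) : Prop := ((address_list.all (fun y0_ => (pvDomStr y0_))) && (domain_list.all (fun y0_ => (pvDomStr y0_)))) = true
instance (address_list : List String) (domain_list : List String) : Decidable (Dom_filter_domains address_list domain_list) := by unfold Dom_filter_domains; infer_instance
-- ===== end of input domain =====

-- B keeps the same filtering task but swaps the loop nesting: one filtering pass of the
-- surviving list per domain (a successive sieve) instead of A's per-address scan over all
-- domains with an accumulator; objective: alternative.

-- ===== PORT A =====
def filter_domains (address_list : List String) (domain_list : List String) : List String :=
  address_list.foldl
    (fun result address =>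
      if domain_list.any (fun domain => PySem.Str.isIn domain address) then result
      else result ++ [address])
    []

-- ===== PORT B =====
def filter_domains_alt (address_list : List String) (domain_list : List String) : List String :=
  domain_list.foldl
    (fun survivors domain => survivors.filter (fun a => !PySem.Str.isIn domain a))
    address_list

-- ===== PRECONDITION & SPEC =====
def Spec_filter_domains (address_list : List String) (domain_list : List String) (out : List String) : Prop := out = filter_domains_alt address_list domain_list
instance (address_list : List String) (domain_list : List String) (out : List String) : Decidable (Spec_filter_domains address_list domain_list out) := by unfold Spec_filter_domains; infer_instance

-- ===== CLAIM (what is proved, stated in full; the proofs are below) =====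
def Claim_equal_filter_domains : Prop := ∀ (address_list : List String) (domain_list : List String), Dom_filter_domains address_list domain_list → Spec_filter_domains address_list domain_list (filter_domains address_list domain_list)

-- ===== LEMMAS AND PROOFS =====

-- A's accumulator loop is a filter by "no domain occurs"
theorem foldl_acc_eq_filter (p : String → Bool) (xs : List String) (acc : List String) :
    xs.foldl (fun result address => if p address then result else result ++ [address]) acc
      = acc ++ xs.filter (fun a => !p a) := by
  induction xs generalizing acc with
  | nil => simp
  | cons x t ih =>
      simp only [List.foldl_cons, List.filter_cons]
      by_cases h : p x
      · rw [if_pos h, ih]; simp [h]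
      · rw [if_neg h, ih]; simp [h]

-- B's successive sieve is a filter by "no domain occurs"
theorem sieve_eq_filter (ds : List String) (xs : List String) :
    ds.foldl (fun survivors domain => survivors.filter (fun a => !PySem.Str.isIn domain a)) xs
      = xs.filter (fun a => !ds.any (fun d => PySem.Str.isIn d a)) := by
  induction ds generalizing xs with
  | nil => simp
  | cons d t ih =>
      rw [List.foldl_cons, ih, List.filter_filter]
      apply List.filter_congr
      intro a _
      simp only [List.any_cons, Bool.not_or]
      cases PySem.Str.isIn d a <;> simp

-- ===== VERDICT (by name: the statement is the Claim_ definition above) =====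
theorem filter_domains_spec : Claim_equal_filter_domains := by
  intro address_list domain_list _
  unfold Spec_filter_domains filter_domains filter_domains_alt
  rw [foldl_acc_eq_filter, List.nil_append, sieve_eq_filter]
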